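-- pv_equiv track=rewrite | github.com/khloe1425/luyenthihsgioi | THCS/2022_2023/KienGiang_2223/Bai2/Ptichso.py | find_consecutive_sum
-- ===== SOURCE A (Python) =====
-- def find_consecutive_sum(n):
--     results = []
--
--     # Duyệt từ 1 đến n/2 để tìm các dãy số liên tiếp
--     for start in range(1, n // 2 + 1):
--         sum_consecutive = 0
--         current = start
--
--         while sum_consecutive < n:
--             sum_consecutive += current
--             current += 1
--
--             if sum_consecutive == n:
--                 # Thêm dãy số vào kết quả
--                 results.append(list(range(start, current)))
--
--     return results
-- ===== SOURCE B (Python) =====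
-- def find_consecutive_sum(n):
--     # Enumerate run LENGTHS k (descending) instead of start values: a run of
--     # length k starting at a sums to n iff k*a + k*(k-1)//2 == n with a >= 1,
--     # which requires k*(k+1)//2 <= n, i.e. k = O(sqrt(n)).
--     ks = []
--     k = 2
--     while k * (k + 1) // 2 <= n:
--         ks.append(k)
--         k += 1
--     results = []
--     for k in reversed(ks):
--         t = n - k * (k - 1) // 2
--         if t % k == 0:
--             a = t // k
--             results.append(list(range(a, a + k)))
--     return results
-- ===== Notes on version B (the rewrite author's own statement) =====
-- stated objective: faster
-- what changed: Instead of trying every start up to half of n and summing each run upward until it reaches n, B enumerates candidate run lengths k while the k-th triangular number is at most n (so k = O(sqrt n)) and solves the closed-form equation k*a + k*(k-1)/2 = n for an integer start a, iterating lengths in descending order so starts come out ascending exactly as in A.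
import Mathlib
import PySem

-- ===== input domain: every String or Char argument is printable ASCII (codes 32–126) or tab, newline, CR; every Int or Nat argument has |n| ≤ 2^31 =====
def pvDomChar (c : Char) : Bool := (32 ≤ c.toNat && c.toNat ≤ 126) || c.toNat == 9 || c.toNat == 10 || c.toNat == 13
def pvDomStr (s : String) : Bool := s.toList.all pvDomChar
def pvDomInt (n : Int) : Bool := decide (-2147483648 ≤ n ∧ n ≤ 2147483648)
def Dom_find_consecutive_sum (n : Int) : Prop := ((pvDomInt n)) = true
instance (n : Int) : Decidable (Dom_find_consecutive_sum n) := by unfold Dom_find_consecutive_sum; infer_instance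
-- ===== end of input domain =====

-- B enumerates run lengths k = O(√n) and solves for the start, instead of A's scan of all starts up to n//2: asymptotically faster, same output.

-- ===== PORT A =====
-- inner `while sum_consecutive < n` loop; `fuel` only makes the recursion total
-- (fuel is never exhausted on the actual calls, where current = start ≥ 1).
def pvInnerA (n start : Int) : Nat → Int → Int → List (List Int) → List (List Int)
  | 0, _, _, res => res
  | fuel + 1, sum, current, res =>
    if sum < n then
      let sum' := sum + current
      let current' := current + 1
      let res' := if sum' = n then res ++ [PySem.List.pyRange start current' 1] else res
      pvInnerA n start fuel sum' current' res'
    else res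

def find_consecutive_sum (n : Int) : List (List Int) :=
  (PySem.List.pyRange 1 (PySem.Int.floordiv n 2 + 1) 1).foldl
    (fun res start => pvInnerA n start (n.toNat + 1) 0 start res) []

-- ===== PORT B =====
-- `while k*(k+1)//2 <= n: ks.append(k); k += 1`; the counter is kept as a Nat
-- (it starts at 2 and only increments) so the recursion is well-founded.
def pvKsB (n : Int) (k : Nat) : List Int :=
  if h : PySem.Int.floordiv ((k : Int) * ((k : Int) + 1)) 2 ≤ n then
    (k : Int) :: pvKsB n (k + 1)
  else []
  termination_by n.toNat + 2 - k
  decreasing_by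
    rw [PySem.Int.floordiv_eq_ediv_of_pos (by omega : (0:Int) < 2)] at h
    have hkk : (k : Int) ≤ (k : Int) * ((k : Int) + 1) / 2 := by
      rw [Int.le_ediv_iff_mul_le (by omega : (0:Int) < 2)]
      rcases Nat.eq_zero_or_pos k with hk0 | hk0
      · subst hk0; norm_num
      · have : (1 : Int) ≤ (k : Int) := by exact_mod_cast hk0
        nlinarith
    have hk : (k : Int) ≤ n := le_trans hkk h
    omega

def find_consecutive_sum_alt (n : Int) : List (List Int) :=
  (pvKsB n 2).reverse.foldl
    (fun res k =>
      let t := n - PySem.Int.floordiv (k * (k - 1)) 2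
      if PySem.Int.mod t k = 0 then
        let a := PySem.Int.floordiv t k
        res ++ [PySem.List.pyRange a (a + k) 1]
      else res) []

-- ===== PRECONDITION & SPEC =====
def Spec_find_consecutive_sum (n : Int) (out : List (List Int)) : Prop := out = find_consecutive_sum_alt n
instance (n : Int) (out : List (List Int)) : Decidable (Spec_find_consecutive_sum n out) := by unfold Spec_find_consecutive_sum; infer_instance

-- ===== CLAIM (what is proved, stated in full; the proofs are below) =====
def Claim_equal_find_consecutive_sum : Prop := ∀ (n : Int), Dom_find_consecutive_sum n → Spec_find_consecutive_sum n (find_consecutive_sum n)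

-- ===== LEMMAS AND PROOFS =====

-- the inner-loop result starting from (sum = 0, current = s), per start
def pvGA (n s : Int) : List (List Int) := pvInnerA n s (n.toNat + 1) 0 s []

-- "l is a run of ≥ 2 consecutive positive integers summing to n" — the common characterization
def pvIsRun (n : Int) (l : List Int) : Prop :=
  ∃ a k : Int, 1 ≤ a ∧ 2 ≤ k ∧ 2 * a * k + k * (k - 1) = 2 * n ∧
    l = PySem.List.pyRange a (a + k) 1

theorem pvInnerA_stop (n s : Int) (fuel : Nat) (sum current : Int)
    (res : List (List Int)) (h : ¬ sum < n) :
    pvInnerA n s fuel sum current res = res := by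
  cases fuel <;> simp [pvInnerA, h]

theorem pvInnerA_hit (n s : Int) :
    ∀ (fuel : Nat) (sum current : Int) (res : List (List Int)) (m : Nat),
      1 ≤ current → 1 ≤ m →
      2 * sum + 2 * (m : Int) * current + (m : Int) * ((m : Int) - 1) = 2 * n →
      (n - sum).toNat < fuel →
      pvInnerA n s fuel sum current res = res ++ [PySem.List.pyRange s (current + (m : Int)) 1]
  | 0, sum, current, res, m, _, _, _, hfuel => by omega
  | fuel + 1, sum, current, res, m, hcur, hm, heq, hfuel => by
    obtain ⟨m', rfl⟩ : ∃ m', m = m' + 1 := ⟨m - 1, by omega⟩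
    have hm1 : (1 : Int) ≤ (m' : Int) + 1 := by exact_mod_cast hm
    push_cast at heq ⊢
    have hmc : (1 : Int) ≤ ((m' : Int) + 1) * current := by nlinarith
    have hmm : (0 : Int) ≤ ((m' : Int) + 1) * ((m' : Int) + 1 - 1) := by
      have := Int.natCast_nonneg m'; nlinarith
    have hlt : sum < n := by nlinarith
    simp only [pvInnerA, if_pos hlt]
    rcases Nat.eq_zero_or_pos m' with hm0 | hm0
    · subst hm0
      have hsn : sum + current = n := by push_cast at heq; linarith
      rw [if_pos hsn, hsn, pvInnerA_stop n s fuel n (current + 1) _ (lt_irrefl n)]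
      norm_num
    · have hm'1 : (1 : Int) ≤ (m' : Int) := by exact_mod_cast hm0
      have hne : ¬ (sum + current = n) := by nlinarith
      rw [if_neg hne,
        pvInnerA_hit n s fuel (sum + current) (current + 1) res m' (by omega)
          hm0 (by push_cast; linear_combination heq) (by omega)]
      have : current + 1 + (m' : Int) = current + ((m' : Int) + 1) := by ring
      rw [this]

theorem pvInnerA_miss (n s : Int) :
    ∀ (fuel : Nat) (sum current : Int) (res : List (List Int)),
      1 ≤ current →
      (∀ m : Nat, 1 ≤ m →
        2 * sum + 2 * (m : Int) * current + (m : Int) * ((m : Int) - 1) ≠ 2 * n) →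
      pvInnerA n s fuel sum current res = res
  | 0, sum, current, res, _, _ => rfl
  | fuel + 1, sum, current, res, hcur, hmiss => by
    by_cases hlt : sum < n
    · simp only [pvInnerA, if_pos hlt]
      have hne : ¬ (sum + current = n) := by
        intro he
        exact hmiss 1 le_rfl (by norm_num; linarith)
      rw [if_neg hne]
      exact pvInnerA_miss n s fuel (sum + current) (current + 1) res (by omega)
        (fun m hm heq => hmiss (m + 1) (by omega) (by push_cast at heq ⊢; linear_combination heq))
    · exact pvInnerA_stop n s _ sum current res hlt

-- shape of the per-start result: empty, or a single run of the unique fitting length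
theorem pvGA_shape (n s : Int) (hs : 1 ≤ s) (hn : 0 < n) :
    pvGA n s = [] ∨ ∃ m : Nat, 1 ≤ m ∧
      2 * (m : Int) * s + (m : Int) * ((m : Int) - 1) = 2 * n ∧
      pvGA n s = [PySem.List.pyRange s (s + (m : Int)) 1] := by
  by_cases h : ∃ m : Nat, 1 ≤ m ∧ 2 * (m : Int) * s + (m : Int) * ((m : Int) - 1) = 2 * n
  · obtain ⟨m, hm, heq⟩ := h
    refine Or.inr ⟨m, hm, heq, ?_⟩
    unfold pvGA
    rw [pvInnerA_hit n s (n.toNat + 1) 0 s [] m hs hm (by linear_combination heq) (by omega)]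
    rfl
  · push_neg at h
    exact Or.inl (pvInnerA_miss n s (n.toNat + 1) 0 s [] hs
      (fun m hm heq => h m hm (by linear_combination heq)))

theorem pvInnerA_append (n s : Int) (res : List (List Int)) (hs : 1 ≤ s) (hn : 0 < n) :
    pvInnerA n s (n.toNat + 1) 0 s res = res ++ pvGA n s := by
  rcases pvGA_shape n s hs hn with h | ⟨m, hm, heq, h⟩
  · rw [h, List.append_nil]
    unfold pvGA at h
    by_cases hex : ∃ m : Nat, 1 ≤ m ∧ 2 * (m : Int) * s + (m : Int) * ((m : Int) - 1) = 2 * n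
    · obtain ⟨m, hm, heq⟩ := hex
      rw [pvInnerA_hit n s (n.toNat + 1) 0 s [] m hs hm (by linear_combination heq) (by omega)] at h
      simp at h
    · push_neg at hex
      exact pvInnerA_miss n s (n.toNat + 1) 0 s res hs
        (fun m hm heq => hex m hm (by linear_combination heq))
  · rw [h, pvInnerA_hit n s (n.toNat + 1) 0 s res m hs hm (by linear_combination heq) (by omega)]

-- A as a flatMap over the start range
theorem pvA_flat (n : Int) :
    find_consecutive_sum n =
      (PySem.List.pyRange 1 (PySem.Int.floordiv n 2 + 1) 1).flatMap (pvGA n) := by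
  unfold find_consecutive_sum
  rw [PySem.List.foldl_congr_mem _ _ (fun res s => res ++ pvGA n s) []
    (fun res s hsmem => by
      obtain ⟨hs1, hs2⟩ := PySem.List.mem_pyRange_one.mp hsmem
      have hfd : PySem.Int.floordiv n 2 = n / 2 :=
        PySem.Int.floordiv_eq_ediv_of_pos (by omega)
      exact pvInnerA_append n s res hs1 (by omega)),
    PySem.List.foldl_append_eq_flatMap]
  rfl

-- B as filter+map over the (reversed) length list
theorem pvB_flat (n : Int) :
    find_consecutive_sum_alt n =
      ((pvKsB n 2).reverse.filter
          (fun k => decide (PySem.Int.mod (n - PySem.Int.floordiv (k * (k - 1)) 2) k = 0))).map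
        (fun k =>
          PySem.List.pyRange (PySem.Int.floordiv (n - PySem.Int.floordiv (k * (k - 1)) 2) k)
            (PySem.Int.floordiv (n - PySem.Int.floordiv (k * (k - 1)) 2) k + k) 1) := by
  unfold find_consecutive_sum_alt
  rw [PySem.List.foldl_append_ite
    (fun k => PySem.Int.mod (n - PySem.Int.floordiv (k * (k - 1)) 2) k = 0)
    (fun k =>
      PySem.List.pyRange (PySem.Int.floordiv (n - PySem.Int.floordiv (k * (k - 1)) 2) k)
        (PySem.Int.floordiv (n - PySem.Int.floordiv (k * (k - 1)) 2) k + k) 1)]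
  rfl

theorem pvMem_pvKsB (n : Int) (k0 : Nat) (j : Int) :
    j ∈ pvKsB n k0 ↔ (k0 : Int) ≤ j ∧ j * (j + 1) ≤ 2 * n := by
  rw [pvKsB]
  split
  case isTrue h =>
    rw [PySem.Int.floordiv_eq_ediv_of_pos (by omega : (0:Int) < 2)] at h
    obtain ⟨c, hc⟩ := Int.even_mul_succ_self (k0 : Int)
    have hfd : (k0 : Int) * ((k0 : Int) + 1) ≤ 2 * n := by
      rw [hc] at h ⊢; omega
    rw [List.mem_cons, pvMem_pvKsB n (k0 + 1) j]
    constructor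
    · rintro (rfl | ⟨h1, h2⟩)
      · exact ⟨le_rfl, hfd⟩
      · exact ⟨by push_cast at h1 ⊢; omega, h2⟩
    · rintro ⟨h1, h2⟩
      by_cases hj : j = (k0 : Int)
      · exact Or.inl hj
      · exact Or.inr ⟨by push_cast; omega, h2⟩
  case isFalse h =>
    simp only [List.not_mem_nil, false_iff]
    rintro ⟨h1, h2⟩
    apply h
    have h0 : (0 : Int) ≤ (k0 : Int) := Int.natCast_nonneg k0
    have hmono : (k0 : Int) * ((k0 : Int) + 1) ≤ j * (j + 1) := by nlinarith
    have : ¬ (n + 1 ≤ PySem.Int.floordiv ((k0 : Int) * ((k0 : Int) + 1)) 2) := by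
      rw [PySem.Int.le_floordiv_iff_mul_le (by omega : (0:Int) < 2)]
      omega
    omega
  termination_by n.toNat + 2 - k0
  decreasing_by
    rename_i h
    rw [PySem.Int.floordiv_eq_ediv_of_pos (by omega : (0:Int) < 2)] at h
    have hkk : (k0 : Int) ≤ (k0 : Int) * ((k0 : Int) + 1) / 2 := by
      rw [Int.le_ediv_iff_mul_le (by omega : (0:Int) < 2)]
      rcases Nat.eq_zero_or_pos k0 with hk0 | hk0
      · subst hk0; norm_num
      · have : (1 : Int) ≤ (k0 : Int) := by exact_mod_cast hk0
        nlinarith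
    have hk : (k0 : Int) ≤ n := le_trans hkk h
    omega

theorem pvPairwise_pvKsB (n : Int) (k0 : Nat) :
    (pvKsB n k0).Pairwise (· < ·) := by
  rw [pvKsB]
  split
  case isTrue h =>
    refine List.Pairwise.cons ?_ (pvPairwise_pvKsB n (k0 + 1))
    intro j hj
    have := (pvMem_pvKsB n (k0 + 1) j).mp hj
    push_cast at this; omega
  case isFalse h => exact List.Pairwise.nil
  termination_by n.toNat + 2 - k0
  decreasing_by
    rename_i h
    rw [PySem.Int.floordiv_eq_ediv_of_pos (by omega : (0:Int) < 2)] at h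
    have hkk : (k0 : Int) ≤ (k0 : Int) * ((k0 : Int) + 1) / 2 := by
      rw [Int.le_ediv_iff_mul_le (by omega : (0:Int) < 2)]
      rcases Nat.eq_zero_or_pos k0 with hk0 | hk0
      · subst hk0; norm_num
      · have : (1 : Int) ≤ (k0 : Int) := by exact_mod_cast hk0
        nlinarith
    have hk : (k0 : Int) ≤ n := le_trans hkk h
    omega

-- per-length facts for B: the start a is exact and positive
theorem pvB_elem (n k : Int) (hk : 2 ≤ k) (hkn : k * (k + 1) ≤ 2 * n)
    (hp : PySem.Int.mod (n - PySem.Int.floordiv (k * (k - 1)) 2) k = 0) :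
    ∃ a : Int, 1 ≤ a ∧ 2 * a * k + k * (k - 1) = 2 * n ∧
      PySem.Int.floordiv (n - PySem.Int.floordiv (k * (k - 1)) 2) k = a := by
  obtain ⟨c, hc⟩ : Even (k * (k - 1)) := by
    have := Int.even_mul_succ_self (k - 1)
    have h2 : (k - 1) * (k - 1 + 1) = k * (k - 1) := by ring
    rwa [h2] at this
  have hfd : PySem.Int.floordiv (k * (k - 1)) 2 = c := by
    rw [PySem.Int.floordiv_eq_ediv_of_pos (by omega : (0:Int) < 2), hc]
    omega
  obtain ⟨d, hd⟩ := (PySem.Int.mod_eq_zero_iff_dvd _ k).mp hp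
  rw [hfd] at hd
  have hfd2 : PySem.Int.floordiv (n - PySem.Int.floordiv (k * (k - 1)) 2) k = d := by
    rw [hfd, hd, PySem.Int.floordiv_eq_ediv_of_pos (by omega : (0:Int) < k)]
    exact Int.mul_ediv_cancel_left d (by omega)
  have hd1 : 1 ≤ d := by nlinarith
  exact ⟨d, hd1, by linear_combination hc - 2 * hd, hfd2⟩

theorem pvMemA (n : Int) (l : List Int) :
    l ∈ find_consecutive_sum n ↔ pvIsRun n l := by
  rw [pvA_flat, List.mem_flatMap]
  constructor
  · rintro ⟨s, hsmem, hl⟩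
    obtain ⟨hs1, hs2⟩ := PySem.List.mem_pyRange_one.mp hsmem
    have hfd : PySem.Int.floordiv n 2 = n / 2 :=
      PySem.Int.floordiv_eq_ediv_of_pos (by omega)
    rw [hfd] at hs2
    have hn : 0 < n := by omega
    rcases pvGA_shape n s hs1 hn with h | ⟨m, hm, heq, h⟩
    · rw [h] at hl; simp at hl
    · rw [h, List.mem_singleton] at hl
      have hm2 : 2 ≤ (m : Int) := by
        rcases Nat.lt_or_ge m 2 with hlt | hge
        · have hm1 : m = 1 := by omega
          subst hm1; exfalso; push_cast at heq; omega
        · exact_mod_cast hge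
      exact ⟨s, (m : Int), hs1, hm2, by linear_combination heq, hl⟩
  · rintro ⟨a, k, ha, hk, heq, rfl⟩
    refine ⟨a, ?_, ?_⟩
    · rw [PySem.List.mem_pyRange_one]
      have hfd : PySem.Int.floordiv n 2 = n / 2 :=
        PySem.Int.floordiv_eq_ediv_of_pos (by nlinarith)
      have h4 : 4 * a + 2 ≤ 2 * n := by nlinarith
      rw [hfd]
      omega
    · have hn : 0 < n := by nlinarith
      have hcast : ((k.toNat : Int)) = k := Int.toNat_of_nonneg (by omega)
      rcases pvGA_shape n a ha hn with h | ⟨m, hm, heqm, h⟩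
      · exfalso
        unfold pvGA at h
        rw [pvInnerA_hit n a (n.toNat + 1) 0 a [] k.toNat ha (by omega)
          (by rw [hcast]; linear_combination heq) (by omega)] at h
        simp at h
      · rw [h, List.mem_singleton]
        have h2 := h
        unfold pvGA at h2
        rw [pvInnerA_hit n a (n.toNat + 1) 0 a [] k.toNat ha (by omega)
          (by rw [hcast]; linear_combination heq) (by omega)] at h2
        simp only [List.nil_append, List.cons.injEq, and_true] at h2
        rw [← hcast]
        exact h2

theorem pvMemB (n : Int) (l : List Int) :
    l ∈ find_consecutive_sum_alt n ↔ pvIsRun n l := by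
  rw [pvB_flat, List.mem_map]
  constructor
  · rintro ⟨k, hkmem, hl⟩
    rw [List.mem_filter, List.mem_reverse, pvMem_pvKsB] at hkmem
    obtain ⟨⟨hk2, hkn⟩, hp⟩ := hkmem
    rw [decide_eq_true_eq] at hp
    obtain ⟨a, ha, heq, hfd⟩ := pvB_elem n k (by exact_mod_cast hk2) hkn hp
    rw [hfd] at hl
    exact ⟨a, k, ha, by exact_mod_cast hk2, heq, hl.symm⟩
  · rintro ⟨a, k, ha, hk, heq, rfl⟩
    have hkn : k * (k + 1) ≤ 2 * n := by nlinarith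
    obtain ⟨c, hc⟩ : Even (k * (k - 1)) := by
      have := Int.even_mul_succ_self (k - 1)
      have h2 : (k - 1) * (k - 1 + 1) = k * (k - 1) := by ring
      rwa [h2] at this
    have hfdc : PySem.Int.floordiv (k * (k - 1)) 2 = c := by
      rw [PySem.Int.floordiv_eq_ediv_of_pos (by omega : (0:Int) < 2), hc]
      omega
    have ht : n - PySem.Int.floordiv (k * (k - 1)) 2 = k * a := by
      rw [hfdc]; linarith [heq, hc]
    refine ⟨k, ?_, ?_⟩
    · rw [List.mem_filter, List.mem_reverse, pvMem_pvKsB]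
      refine ⟨⟨by exact_mod_cast hk, hkn⟩, ?_⟩
      rw [decide_eq_true_eq, PySem.Int.mod_eq_zero_iff_dvd, ht]
      exact Dvd.intro a rfl
    · have : PySem.Int.floordiv (n - PySem.Int.floordiv (k * (k - 1)) 2) k = a := by
        rw [ht, PySem.Int.floordiv_eq_ediv_of_pos (by omega : (0:Int) < k)]
        exact Int.mul_ediv_cancel_left a (by omega)
      rw [this]

-- first element of a nonempty ascending range
theorem pvHead_pyRange (a b : Int) (h : a < b) :
    (PySem.List.pyRange a b 1).headD 0 = a := by
  rw [PySem.List.pyRange_one_cons h]; rfl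

theorem pvPairwiseA (n : Int) :
    (find_consecutive_sum n).Pairwise (fun u v => u.headD 0 < v.headD 0) := by
  rw [pvA_flat, List.pairwise_flatMap]
  have hkey : ∀ s : Int, s ∈ PySem.List.pyRange 1 (PySem.Int.floordiv n 2 + 1) 1 →
      ∀ u ∈ pvGA n s, u.headD 0 = s := by
    intro s hsmem u hu
    obtain ⟨hs1, hs2⟩ := PySem.List.mem_pyRange_one.mp hsmem
    have hfd : PySem.Int.floordiv n 2 = n / 2 :=
      PySem.Int.floordiv_eq_ediv_of_pos (by omega)
    rw [hfd] at hs2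
    rcases pvGA_shape n s hs1 (by omega) with h | ⟨m, hm, heq, h⟩
    · rw [h] at hu; simp at hu
    · rw [h, List.mem_singleton] at hu
      subst hu
      exact pvHead_pyRange s (s + (m : Int)) (by omega)
  constructor
  · intro s hsmem
    obtain ⟨hs1, hs2⟩ := PySem.List.mem_pyRange_one.mp hsmem
    have hfd : PySem.Int.floordiv n 2 = n / 2 :=
      PySem.Int.floordiv_eq_ediv_of_pos (by omega)
    rw [hfd] at hs2
    rcases pvGA_shape n s hs1 (by omega) with h | ⟨m, hm, heq, h⟩ <;> rw [h] <;> simp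
  · exact (PySem.List.pairwise_lt_pyRange_one 1 (PySem.Int.floordiv n 2 + 1)).imp_of_mem
      (fun {s1 s2} h1 h2 hlt u hu v hv => by
        rw [hkey s1 h1 u hu, hkey s2 h2 v hv]; exact hlt)

theorem pvPairwiseB (n : Int) :
    (find_consecutive_sum_alt n).Pairwise (fun u v => u.headD 0 < v.headD 0) := by
  rw [pvB_flat, List.pairwise_map]
  have hbase : ((pvKsB n 2).reverse.filter
      (fun k => decide (PySem.Int.mod (n - PySem.Int.floordiv (k * (k - 1)) 2) k = 0))).Pairwise
      (fun k1 k2 => k2 < k1) :=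
    (List.pairwise_reverse.mpr (pvPairwise_pvKsB n 2)).filter _
  refine hbase.imp_of_mem ?_
  intro k1 k2 h1 h2 hgt
  rw [List.mem_filter, List.mem_reverse, pvMem_pvKsB, decide_eq_true_eq] at h1 h2
  obtain ⟨⟨hk1, hkn1⟩, hp1⟩ := h1
  obtain ⟨⟨hk2, hkn2⟩, hp2⟩ := h2
  obtain ⟨a1, ha1, heq1, hfd1⟩ := pvB_elem n k1 (by exact_mod_cast hk1) hkn1 hp1
  obtain ⟨a2, ha2, heq2, hfd2⟩ := pvB_elem n k2 (by exact_mod_cast hk2) hkn2 hp2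
  rw [hfd1, hfd2, pvHead_pyRange a1 (a1 + k1) (by push_cast at hk1; omega),
    pvHead_pyRange a2 (a2 + k2) (by push_cast at hk2; omega)]
  -- longer run ⇒ strictly smaller start
  push_cast at hk1 hk2
  by_contra hle
  push_neg at hle
  nlinarith

-- ===== VERDICT (by name: the statement is the Claim_ definition above) =====
theorem find_consecutive_sum_spec : Claim_equal_find_consecutive_sum := by
  intro n _
  unfold Spec_find_consecutive_sum
  have hA := pvPairwiseA n
  have hB := pvPairwiseB n
  have hAnd : (find_consecutive_sum n).Nodup :=
    hA.imp (fun {u v} h => by intro he; subst he; exact lt_irrefl _ h)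
  have hBnd : (find_consecutive_sum_alt n).Nodup :=
    hB.imp (fun {u v} h => by intro he; subst he; exact lt_irrefl _ h)
  have hperm : (find_consecutive_sum n).Perm (find_consecutive_sum_alt n) :=
    (List.perm_ext_iff_of_nodup hAnd hBnd).mpr
      (fun l => (pvMemA n l).trans (pvMemB n l).symm)
  exact List.Perm.eq_of_pairwise
    (fun a b _ _ h1 h2 => absurd h2 (not_lt.mpr (le_of_lt h1))) hA hB hperm
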